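-- pv_equiv track=rewrite | github.com/jere-mie/graph-webapp | graph_algos/generationBasedOnSeacrest.py | checkConnectedKFactor
-- ===== SOURCE A (Python) =====
-- def ceildiv(a, b):
--     return -(a // -b)
--
-- def checkConnectedKFactor(seq):
--     n = len(seq)
--     # For each s < n/2
--     for s in range(1, ceildiv(n, 2)):
--         sumLeft = 0
--         # s(n - s - 1)
--         sumRight = s*(n - s - 1)
--
--         # Σ(i=1 to s) d[i]
--         for i in range(1, s+1):
--             sumLeft += seq[i - 1]
--
--         # + Σ(i=0 to s-1) d[n-i]
--         for i in range(s):
--             sumRight += seq[n - i - 1]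
--
--         # sumLeft < sumRight must hold
--         if sumLeft >= sumRight:
--             # It has no connected k-factor
--             return False
--
--     # All values of s pass, has connected k-factor
--     return True
-- ===== SOURCE B (Python) =====
-- def checkConnectedKFactor(seq):
--     # Single pass: maintain the prefix and suffix sums incrementally (O(n)).
--     n = len(seq)
--     left = 0
--     right = 0
--     for s in range(1, -(n // -2)):
--         left += seq[s - 1]
--         right += seq[n - s]
--         if left >= right + s * (n - s - 1):
--             return False
--     return True
-- ===== Notes on version B (the rewrite author's own statement) =====
-- stated objective: faster
-- what changed: Replaces the per-s recomputation of the prefix and suffix sums by two running accumulators updated once per step, turning the nested loops into a single pass.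
import Mathlib
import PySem

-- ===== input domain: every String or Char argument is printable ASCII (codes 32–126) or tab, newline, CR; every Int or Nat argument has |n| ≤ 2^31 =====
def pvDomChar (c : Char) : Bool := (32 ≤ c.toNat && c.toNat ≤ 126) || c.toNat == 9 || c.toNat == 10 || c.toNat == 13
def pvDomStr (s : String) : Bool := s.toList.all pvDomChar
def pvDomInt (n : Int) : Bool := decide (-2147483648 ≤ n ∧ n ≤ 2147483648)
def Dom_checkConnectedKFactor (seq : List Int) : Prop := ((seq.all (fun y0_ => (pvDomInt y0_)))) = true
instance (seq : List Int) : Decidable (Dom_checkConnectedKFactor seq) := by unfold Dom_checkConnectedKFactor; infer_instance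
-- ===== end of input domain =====

-- B replaces A's per-s recomputation of both sums by two running accumulators (single pass, O(n)).

-- ===== PORT A =====
def ceildivA (a b : Int) : Int := -(PySem.Int.floordiv a (-b))

-- the outer 'for s in range(1, ceildiv(n,2))' loop with early return, over its remaining range
def ckfLoopA (seq : List Int) (n : Int) : List Int → Bool
  | [] => true
  | s :: rest =>
    let sumLeft := (PySem.List.pyRange 1 (s+1) 1).foldl
      (fun acc i => acc + PySem.List.pyGetD seq (i - 1) 0) 0
    let sumRight := (PySem.List.pyRange 0 s 1).foldl
      (fun acc i => acc + PySem.List.pyGetD seq (n - i - 1) 0) (s * (n - s - 1))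
    if sumLeft ≥ sumRight then false else ckfLoopA seq n rest

def checkConnectedKFactor (seq : List Int) : Bool :=
  let n : Int := seq.length
  ckfLoopA seq n (PySem.List.pyRange 1 (ceildivA n 2) 1)

-- ===== PORT B =====
-- the single-pass loop with running accumulators, over its remaining range
def ckfLoopB (seq : List Int) (n : Int) (left right : Int) : List Int → Bool
  | [] => true
  | s :: rest =>
    let left' := left + PySem.List.pyGetD seq (s - 1) 0
    let right' := right + PySem.List.pyGetD seq (n - s) 0
    if left' ≥ right' + s * (n - s - 1) then false else ckfLoopB seq n left' right' rest

def checkConnectedKFactor_alt (seq : List Int) : Bool :=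
  let n : Int := seq.length
  ckfLoopB seq n 0 0 (PySem.List.pyRange 1 (-(PySem.Int.floordiv n (-2))) 1)

-- ===== PRECONDITION & SPEC =====
def Spec_checkConnectedKFactor (seq : List Int) (out : Bool) : Prop := out = checkConnectedKFactor_alt seq
instance (seq : List Int) (out : Bool) : Decidable (Spec_checkConnectedKFactor seq out) := by unfold Spec_checkConnectedKFactor; infer_instance

-- ===== CLAIM (what is proved, stated in full; the proofs are below) =====
def Claim_equal_checkConnectedKFactor : Prop := ∀ (seq : List Int), Dom_checkConnectedKFactor seq → Spec_checkConnectedKFactor seq (checkConnectedKFactor seq)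

-- ===== LEMMAS AND PROOFS =====

-- Invariant: entering iteration s0 with 'left'/'right' equal to A's sums for s0-1, both loops agree.
theorem ckf_loops_eq (seq : List Int) (n m : Int) :
    ∀ (k : Nat) (s0 left right : Int), 1 ≤ s0 → (m - s0).toNat = k →
    left = (PySem.List.pyRange 1 s0 1).foldl
      (fun acc i => acc + PySem.List.pyGetD seq (i - 1) 0) 0 →
    right = (PySem.List.pyRange 0 (s0 - 1) 1).foldl
      (fun acc i => acc + PySem.List.pyGetD seq (n - i - 1) 0) 0 →
    ckfLoopA seq n (PySem.List.pyRange s0 m 1) =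
      ckfLoopB seq n left right (PySem.List.pyRange s0 m 1) := by
  intro k
  induction k with
  | zero =>
    intro s0 left right _ hk _ _
    rw [PySem.List.pyRange_one_eq_nil (by omega)]; rfl
  | succ k ih =>
    intro s0 left right hs0 hk hl hr
    have hlt : s0 < m := by omega
    rw [PySem.List.pyRange_one_cons hlt]
    show (if _ ≥ _ then false else ckfLoopA seq n _) =
      (if _ ≥ _ then false else ckfLoopB seq n _ _ _)
    have hleft : (PySem.List.pyRange 1 (s0+1) 1).foldl
        (fun acc i => acc + PySem.List.pyGetD seq (i - 1) 0) 0
        = left + PySem.List.pyGetD seq (s0 - 1) 0 := by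
      rw [hl, PySem.List.pyRange_one_succ_right (by omega)]
      simp [List.foldl_append]
    have hright : (PySem.List.pyRange 0 s0 1).foldl
        (fun acc i => acc + PySem.List.pyGetD seq (n - i - 1) 0) (s0 * (n - s0 - 1))
        = (right + PySem.List.pyGetD seq (n - s0) 0) + s0 * (n - s0 - 1) := by
      have h1 : s0 = (s0 - 1) + 1 := by omega
      rw [PySem.List.foldl_add, hr, PySem.List.foldl_add, h1,
        PySem.List.pyRange_one_succ_right (by omega)]
      simp [List.map_append]
      ring_nf
    rw [hleft, hright]
    by_cases hcond : left + PySem.List.pyGetD seq (s0 - 1) 0 ≥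
        (right + PySem.List.pyGetD seq (n - s0) 0) + s0 * (n - s0 - 1)
    · simp [hcond]
    · simp only [ge_iff_le, if_neg (by omega : ¬ _)]
      exact ih (s0 + 1) _ _ (by omega) (by omega) (by rw [hleft]) (by
        have h2 : s0 + 1 - 1 = s0 := by omega
        rw [h2]
        rw [PySem.List.foldl_add] at hright ⊢
        linarith [hright])

-- ===== VERDICT (by name: the statement is the Claim_ definition above) =====
theorem checkConnectedKFactor_spec : Claim_equal_checkConnectedKFactor := by
  intro seq _
  unfold Spec_checkConnectedKFactor checkConnectedKFactor checkConnectedKFactor_alt ceildivA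
  exact (ckf_loops_eq seq _ _ _ 1 0 0 le_rfl rfl
    (by rw [PySem.List.pyRange_one_eq_nil le_rfl]; rfl)
    (by rw [PySem.List.pyRange_one_eq_nil (by omega)]; rfl)).symm ▸ rfl
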